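-- pv_equiv track=rewrite | github.com/aiwister/othello | main.py | get_cross
-- ===== SOURCE A (Python) =====
-- def get_cross(where:list):
--     cross_around_up_left=[]
--     cross_around_up_right=[]
--     vertical=[]
--     horizontal=[]
--     if where[0]>where[1]:
--         for i,j in zip(range(1+(where[0]-where[1]),9),range(1,9)):
--             cross_around_up_left.append([i,j])
--     elif where[0]<where[1]:
--         for i,j in zip(range(1,9),range(1+(where[1]-where[0]),9)):
--             cross_around_up_left.append([i,j])
--     else:
--         for i in range(1,9):
--             cross_around_up_left.append([i,i])
--
--     if sum(where)<=8:
--         for i,j in zip(range(1,sum(where)),range(sum(where)-1,0,-1)):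
--             cross_around_up_right.append([i,j])
--     elif sum(where)>8:
--         for i,j in zip(range(sum(where)-8,9),range(8,sum(where)-9,-1)):
--             cross_around_up_right.append([i,j])
--
--     for i in range(1,9):
--         vertical.append([i,where[1]])
--         horizontal.append([where[0],i])
--
--     v_index=vertical.index(where)
--     h_index=horizontal.index(where)
--     up_left_index=cross_around_up_left.index(where)
--     up_right_index=cross_around_up_right.index(where)
--
--     return [
--             list(reversed(vertical[:v_index])),
--             list(reversed(cross_around_up_right[:up_right_index])),
--             horizontal[h_index+1:],
--             cross_around_up_left[up_left_index+1:],
--             vertical[v_index+1:],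
--             cross_around_up_right[up_right_index+1:],
--             list(reversed(horizontal[:h_index])),
--             list(reversed(cross_around_up_left[:up_left_index])),
--             ]
-- ===== SOURCE B (Python) =====
-- def get_cross(where: list):
--     r, c = where[0], where[1]
--     if len(where) != 2 or not (1 <= r <= 8 and 1 <= c <= 8):
--         raise ValueError("cell off the 8x8 board")
--     rays = []
--     for dr, dc in ((-1, 0), (-1, 1), (0, 1), (1, 1), (1, 0), (1, -1), (0, -1), (-1, -1)):
--         ray = []
--         i, j = r + dr, c + dc
--         while 1 <= i <= 8 and 1 <= j <= 8:
--             ray.append([i, j])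
--             i += dr
--             j += dc
--         rays.append(ray)
--     return rays
-- ===== Notes on version B (the rewrite author's own statement) =====
-- stated objective: simpler
-- what changed: B walks the 8 direction vectors directly from the cell with one uniform bounded loop, instead of A's scheme of building four full board lines (vertical, horizontal, two diagonals via arithmetic on range/zip), locating the cell with list.index and slicing/reversing around it.
import Mathlib
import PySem

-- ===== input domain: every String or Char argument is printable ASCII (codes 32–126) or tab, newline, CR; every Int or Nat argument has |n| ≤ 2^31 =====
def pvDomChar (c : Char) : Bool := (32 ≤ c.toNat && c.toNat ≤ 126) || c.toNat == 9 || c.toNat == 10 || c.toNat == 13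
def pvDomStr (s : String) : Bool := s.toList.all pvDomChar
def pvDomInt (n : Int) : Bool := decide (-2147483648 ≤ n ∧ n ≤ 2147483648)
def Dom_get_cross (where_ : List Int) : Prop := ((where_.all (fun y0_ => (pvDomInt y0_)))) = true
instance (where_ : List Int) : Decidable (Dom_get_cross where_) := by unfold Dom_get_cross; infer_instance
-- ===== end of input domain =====

-- B replaces A's build-four-full-lines-then-find-index-and-slice scheme by directly walking
-- the 8 direction vectors from the cell (simpler, one uniform loop).

-- ===== PORT A =====
def get_cross (where_ : List Int) : List (List (List Int)) :=
  -- where[0] / where[1]: Pre_ guarantees the indices are in range (getD 0 totalizes the IndexError)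
  let w0 := (PySem.List.pyGet? where_ 0).getD 0
  let w1 := (PySem.List.pyGet? where_ 1).getD 0
  let upLeft : List (List Int) :=
    if w0 > w1 then
      ((PySem.List.pyRange (1+(w0-w1)) 9 1).zip (PySem.List.pyRange 1 9 1)).map (fun p => [p.1, p.2])
    else if w0 < w1 then
      ((PySem.List.pyRange 1 9 1).zip (PySem.List.pyRange (1+(w1-w0)) 9 1)).map (fun p => [p.1, p.2])
    else
      (PySem.List.pyRange 1 9 1).map (fun i => [i, i])
  let s := where_.sum   -- sum(where)
  let upRight : List (List Int) :=
    -- 'if s<=8 … elif s>8 …' is exhaustive, so if/else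
    if s ≤ 8 then
      ((PySem.List.pyRange 1 s 1).zip (PySem.List.pyRange (s-1) 0 (-1))).map (fun p => [p.1, p.2])
    else
      ((PySem.List.pyRange (s-8) 9 1).zip (PySem.List.pyRange 8 (s-9) (-1))).map (fun p => [p.1, p.2])
  let vertical := (PySem.List.pyRange 1 9 1).map (fun i => [i, w1])
  let horizontal := (PySem.List.pyRange 1 9 1).map (fun i => [w0, i])
  -- .index raises ValueError when where_ is not on the line: Pre_ excludes that (getD 0 totalizes)
  let vIdx : Int := ((PySem.List.index? vertical where_).getD 0 : Nat)
  let hIdx : Int := ((PySem.List.index? horizontal where_).getD 0 : Nat)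
  let ulIdx : Int := ((PySem.List.index? upLeft where_).getD 0 : Nat)
  let urIdx : Int := ((PySem.List.index? upRight where_).getD 0 : Nat)
  [ (PySem.List.slice vertical none (some vIdx)).reverse,
    (PySem.List.slice upRight none (some urIdx)).reverse,
    PySem.List.slice horizontal (some (hIdx+1)) none,
    PySem.List.slice upLeft (some (ulIdx+1)) none,
    PySem.List.slice vertical (some (vIdx+1)) none,
    PySem.List.slice upRight (some (urIdx+1)) none,
    (PySem.List.slice horizontal none (some hIdx)).reverse,
    (PySem.List.slice upLeft none (some ulIdx)).reverse ]

-- ===== PORT B =====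
-- the while loop of Source B; fuel 8 only makes it total (a ray on an 8x8 board has < 8 cells)
def rayB (dr dc : Int) : Nat → Int → Int → List (List Int)
  | 0, _, _ => []
  | n+1, i, j =>
    if 1 ≤ i ∧ i ≤ 8 ∧ 1 ≤ j ∧ j ≤ 8 then [i, j] :: rayB dr dc n (i+dr) (j+dc) else []

def get_cross_alt (where_ : List Int) : List (List (List Int)) :=
  let r := (PySem.List.pyGet? where_ 0).getD 0
  let c := (PySem.List.pyGet? where_ 1).getD 0
  if where_.length = 2 ∧ 1 ≤ r ∧ r ≤ 8 ∧ 1 ≤ c ∧ c ≤ 8 then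
    ([(-1,0),(-1,1),(0,1),(1,1),(1,0),(1,-1),(0,-1),(-1,-1)] : List (Int × Int)).map
      (fun d => rayB d.1 d.2 8 (r + d.1) (c + d.2))
  else []  -- Python B raises ValueError here; these inputs are outside Pre_

-- ===== PRECONDITION & SPEC =====
-- Pre_ excludes inputs where A raises: where must be a [row, col] pair on the 1..8 board,
-- otherwise A's list.index (or where[0]/where[1]) raises ValueError/IndexError.
def Pre_get_cross (where_ : List Int) : Prop :=
  where_.length = 2 ∧ ∀ x ∈ where_, 1 ≤ x ∧ x ≤ 8
instance (where_ : List Int) : Decidable (Pre_get_cross where_) := by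
  unfold Pre_get_cross; infer_instance
def pvWitness_get_cross : List Int := [3, 5]

def Spec_get_cross (where_ : List Int) (out : List (List (List Int))) : Prop := out = get_cross_alt where_
instance (where_ : List Int) (out : List (List (List Int))) : Decidable (Spec_get_cross where_ out) := by unfold Spec_get_cross; infer_instance

-- ===== CLAIM (what is proved, stated in full; the proofs are below) =====
def Claim_equal_get_cross : Prop := ∀ (where_ : List Int), Dom_get_cross where_ → Pre_get_cross where_ → Spec_get_cross where_ (get_cross where_)

-- ===== LEMMAS AND PROOFS =====
lemma get_cross_eq_pair (r c : Int) (hr1 : 1 ≤ r) (hr8 : r ≤ 8) (hc1 : 1 ≤ c) (hc8 : c ≤ 8) :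
    get_cross [r, c] = get_cross_alt [r, c] := by
  interval_cases r <;> interval_cases c <;> decide

-- ===== VERDICT (by name: the statement is the Claim_ definition above) =====
theorem get_cross_spec : Claim_equal_get_cross := by
  intro w _ hpre
  obtain ⟨hlen, hb⟩ := hpre
  match w, hlen with
  | [r, c], _ =>
    have hr := hb r (by simp)
    have hc := hb c (by simp)
    exact get_cross_eq_pair r c hr.1 hr.2 hc.1 hc.2
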